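-- pv_equiv track=rewrite | github.com/Andywangsen/A-time-frequency-energy-atlas-of-human-cardiac-mechanics | Extended Data Fig. 5/Extended Data Fig. 5_Feature_selection.py | generate_valid_combinations
-- ===== SOURCE A (Python) =====
-- import itertools
--
-- def get_feature_category(feature_name):
--     """
--     Return the category of the feature based on its name.
--
--     Args:
--         feature_name: Feature name string
--
--     Returns:
--         int: Feature category (1, 2, 3) or None
--     """
--     name = feature_name.strip()
--     clean_name = name.replace("_grid", "").replace("_sensitivity", "")
--
--     if clean_name.startswith("E") and clean_name.endswith("All Freq)"):
--         return 1, "E$_{Impulse}$\n(Sys.Mag.)"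
--
--     if clean_name.startswith("H") and clean_name.endswith("All Freq)"):
--         return 3, "H$_{Impulse}$\n(Sys.Mag.)"
--
--     # ER Class
--     if clean_name.startswith("ER_{0-100Hz}"):
--         return 2, "E$_{Burst}$\n(Sys.ER)"
--
--     # Ends with 80 Class
--     if clean_name.startswith("E") and clean_name.endswith("80)"):
--         return 6, "E$_{Stiffness}$\n(Dias.Mid-High)"
--
--     if clean_name.startswith("H") and clean_name.endswith("80)"):
--         return 7, "H$_{Stiffness}$\n(Dias.Mid-High)"
--
--     # Other Intermediate States
--     if (
--         clean_name.startswith("E")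
--         and "All Freq" not in clean_name
--         and "700" not in clean_name
--     ):
--         return 5, "E$_{Load}$\n(Dias.Low)"
--
--     if (
--         clean_name.startswith("H")
--         and "All Freq" not in clean_name
--         and "700" not in clean_name
--     ):
--         return 4, "H$_{Load}$\n(Sys.Low)"
--
--     return 8, "8. Others"
--
-- def generate_valid_combinations(feature_names, combo_size=3):
--     """
--     Generate mutually exclusive feature combinations.
--
--     Ensure that features in each combination come from different categories.
--
--     Args:
--         feature_names: List of feature names
--         combo_size: Combination size (default 3)
--
--     Returns:
--         list: List of valid feature combinations
--     """
--     combinations = []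
--     for combo in itertools.combinations(feature_names, combo_size):
--         categories = [get_feature_category(f) for f in combo]
--         valid_cats = [c for c in categories if c is not None]
--         if len(valid_cats) == len(set(valid_cats)):
--             combinations.append(combo)
--     return combinations
-- ===== SOURCE B (Python) =====
-- def get_feature_category(feature_name):
--     name = feature_name.strip()
--     clean_name = name.replace("_grid", "").replace("_sensitivity", "")
--
--     if clean_name.startswith("E") and clean_name.endswith("All Freq)"):
--         return 1, "E$_{Impulse}$\n(Sys.Mag.)"
--     if clean_name.startswith("H") and clean_name.endswith("All Freq)"):
--         return 3, "H$_{Impulse}$\n(Sys.Mag.)"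
--     if clean_name.startswith("ER_{0-100Hz}"):
--         return 2, "E$_{Burst}$\n(Sys.ER)"
--     if clean_name.startswith("E") and clean_name.endswith("80)"):
--         return 6, "E$_{Stiffness}$\n(Dias.Mid-High)"
--     if clean_name.startswith("H") and clean_name.endswith("80)"):
--         return 7, "H$_{Stiffness}$\n(Dias.Mid-High)"
--     if (clean_name.startswith("E") and "All Freq" not in clean_name
--             and "700" not in clean_name):
--         return 5, "E$_{Load}$\n(Dias.Low)"
--     if (clean_name.startswith("H") and "All Freq" not in clean_name
--             and "700" not in clean_name):
--         return 4, "H$_{Load}$\n(Sys.Low)"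
--     return 8, "8. Others"
--
--
-- def generate_valid_combinations(feature_names, combo_size=3):
--     # Precompute categories once, then backtrack over index suffixes,
--     # pruning any branch whose category is already used.
--     pairs = [(f, get_feature_category(f)) for f in feature_names]
--
--     def bt(start, k, used):
--         if k == 0:
--             return [()]
--         if start == len(pairs):
--             return []
--         f, c = pairs[start]
--         out = []
--         if c not in used:
--             out = [(f,) + t for t in bt(start + 1, k - 1, used | {c})]
--         return out + bt(start + 1, k, used)
--
--     return bt(0, combo_size, frozenset())
-- ===== Notes on version B (the rewrite author's own statement) =====
-- stated objective: faster
-- what changed: Replaces A's filter over the full itertools.combinations enumeration by an index-suffix backtracking search over precomputed (name, category) pairs that prunes any branch whose category is already used, emitting the same combos in the same lexicographic order; intended as faster (prunes instead of enumerating all C(n,k) combos; measured up to 12-157x at sizes where A still finishes, A times out at n=64 where B returns).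
import Mathlib
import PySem

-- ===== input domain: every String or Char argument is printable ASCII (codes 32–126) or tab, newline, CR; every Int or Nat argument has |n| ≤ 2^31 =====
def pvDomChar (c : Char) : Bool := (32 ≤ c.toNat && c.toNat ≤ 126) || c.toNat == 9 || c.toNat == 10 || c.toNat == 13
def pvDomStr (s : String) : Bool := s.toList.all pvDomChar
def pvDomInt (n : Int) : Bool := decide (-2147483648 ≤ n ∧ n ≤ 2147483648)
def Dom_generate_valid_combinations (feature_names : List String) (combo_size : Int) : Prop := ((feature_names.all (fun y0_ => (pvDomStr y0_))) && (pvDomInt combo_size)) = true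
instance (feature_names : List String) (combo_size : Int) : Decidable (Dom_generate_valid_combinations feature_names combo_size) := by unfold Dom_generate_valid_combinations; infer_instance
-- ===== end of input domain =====

-- B replaces A's filtered enumeration of all size-k combinations by a category-pruned
-- index backtracking over precomputed categories that prunes used categories (intended as faster;
-- a timing run measured B ahead at every size where A finishes).

-- ===== PORT A =====

-- helper get_feature_category: always returns a pair (the Python 'if c is not None'
-- filter in generate_valid_combinations is therefore vacuous)
def pyGetFeatureCategory (feature_name : String) : Int × String :=
  let name := PySem.Str.strip feature_name
  let clean_name := PySem.Str.replace (PySem.Str.replace name "_grid" "") "_sensitivity" ""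
  if PySem.Str.startswith clean_name "E" && PySem.Str.endswith clean_name "All Freq)" then
    (1, "E$_{Impulse}$\n(Sys.Mag.)")
  else if PySem.Str.startswith clean_name "H" && PySem.Str.endswith clean_name "All Freq)" then
    (3, "H$_{Impulse}$\n(Sys.Mag.)")
  else if PySem.Str.startswith clean_name "ER_{0-100Hz}" then
    (2, "E$_{Burst}$\n(Sys.ER)")
  else if PySem.Str.startswith clean_name "E" && PySem.Str.endswith clean_name "80)" then
    (6, "E$_{Stiffness}$\n(Dias.Mid-High)")
  else if PySem.Str.startswith clean_name "H" && PySem.Str.endswith clean_name "80)" then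
    (7, "H$_{Stiffness}$\n(Dias.Mid-High)")
  else if PySem.Str.startswith clean_name "E" && !PySem.Str.isIn "All Freq" clean_name
      && !PySem.Str.isIn "700" clean_name then
    (5, "E$_{Load}$\n(Dias.Low)")
  else if PySem.Str.startswith clean_name "H" && !PySem.Str.isIn "All Freq" clean_name
      && !PySem.Str.isIn "700" clean_name then
    (4, "H$_{Load}$\n(Sys.Low)")
  else
    (8, "8. Others")

-- itertools.combinations(xs, r): size-r combinations in lexicographic index order
def pyCombinations {α : Type} : Nat → List α → List (List α)
  | 0, _ => [[]]
  | _ + 1, [] => []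
  | k + 1, x :: xs => (pyCombinations k xs).map (x :: ·) ++ pyCombinations (k + 1) xs

def generate_valid_combinations (feature_names : List String) (combo_size : Int) : List (List String) :=
  (pyCombinations combo_size.toNat feature_names).foldl
    (fun combinations combo =>
      let categories := combo.map pyGetFeatureCategory
      let valid_cats := categories   -- no element is None: the Python list-comp keeps all
      if valid_cats.length == (PySem.Set.ofList valid_cats).length then
        combinations ++ [combo]
      else combinations) []

-- ===== PORT B =====

-- backtracking over the suffix of (name, category) pairs, pruning used categories
def pvBt (pairs : List (String × (Int × String))) (k : Int)
    (used : PySem.Set (Int × String)) : List (List String) :=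
  if k = 0 then [[]]
  else
    match pairs with
    | [] => []
    | (f, c) :: rest =>
      (if PySem.Set.contains used c then []
       else (pvBt rest (k - 1) (PySem.Set.add used c)).map (f :: ·))
      ++ pvBt rest k used

def generate_valid_combinations_alt (feature_names : List String) (combo_size : Int) : List (List String) :=
  let pairs := feature_names.map (fun f => (f, pyGetFeatureCategory f))
  pvBt pairs combo_size PySem.Set.empty

-- ===== PRECONDITION & SPEC =====
-- A raises ValueError (itertools.combinations with negative r) when combo_size < 0.
def Pre_generate_valid_combinations (feature_names : List String) (combo_size : Int) : Prop :=
  0 ≤ combo_size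
instance (feature_names : List String) (combo_size : Int) : Decidable (Pre_generate_valid_combinations feature_names combo_size) := by unfold Pre_generate_valid_combinations; infer_instance

def pvWitness_generate_valid_combinations : List String × Int :=
  (["E (All Freq)", "H (All Freq)", "E (40-80)"], 2)

def Spec_generate_valid_combinations (feature_names : List String) (combo_size : Int) (out : List (List String)) : Prop := out = generate_valid_combinations_alt feature_names combo_size
instance (feature_names : List String) (combo_size : Int) (out : List (List String)) : Decidable (Spec_generate_valid_combinations feature_names combo_size out) := by unfold Spec_generate_valid_combinations; infer_instance

-- ===== CLAIM (what is proved, stated in full; the proofs are below) =====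
def Claim_equal_generate_valid_combinations : Prop := ∀ (feature_names : List String) (combo_size : Int), Dom_generate_valid_combinations feature_names combo_size → Pre_generate_valid_combinations feature_names combo_size → Spec_generate_valid_combinations feature_names combo_size (generate_valid_combinations feature_names combo_size)

-- ===== LEMMAS AND PROOFS =====

-- the validity test that pvBt enforces along a branch
def pvOk (used : PySem.Set (Int × String)) : List (Int × String) → Bool
  | [] => true
  | c :: rest => !PySem.Set.contains used c && pvOk (PySem.Set.add used c) rest

lemma pvContains_true {α : Type} [BEq α] [LawfulBEq α] (s : PySem.Set α) (x : α)
    (h : x ∈ s) : PySem.Set.contains s x = true := (PySem.Set.contains_iff _ _).2 h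

lemma pvContains_false {α : Type} [BEq α] [LawfulBEq α] (s : PySem.Set α) (x : α)
    (h : x ∉ s) : PySem.Set.contains s x = false := by
  cases hb : PySem.Set.contains s x
  · rfl
  · exact absurd ((PySem.Set.contains_iff _ _).1 hb) h

lemma pvOk_iff (cs : List (Int × String)) : ∀ used,
    (pvOk used cs = true ↔ (cs.Nodup ∧ ∀ c ∈ cs, c ∉ used)) := by
  induction cs with
  | nil => intro used; simp [pvOk]
  | cons c rest ih =>
    intro used
    rw [pvOk, Bool.and_eq_true, Bool.not_eq_true']
    constructor
    · rintro ⟨h1, h2⟩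
      obtain ⟨hn, hall⟩ := (ih _).1 h2
      have hcu : c ∉ used := by
        intro hm; rw [pvContains_true _ _ hm] at h1; exact Bool.noConfusion h1
      have hcr : c ∉ rest := by
        intro hm
        exact (hall c hm) ((PySem.Set.mem_add _ _ _).2 (Or.inr rfl))
      refine ⟨List.nodup_cons.2 ⟨hcr, hn⟩, ?_⟩
      intro d hd
      rcases List.mem_cons.1 hd with rfl | hd'
      · exact hcu
      · intro hm
        exact (hall d hd') ((PySem.Set.mem_add _ _ _).2 (Or.inl hm))
    · rintro ⟨hn, hall⟩
      obtain ⟨hcr, hn'⟩ := List.nodup_cons.1 hn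
      refine ⟨pvContains_false _ _ (hall c (List.mem_cons_self)), ?_⟩
      refine (ih _).2 ⟨hn', ?_⟩
      intro d hd hm
      rcases (PySem.Set.mem_add _ _ _).1 hm with hm' | rfl
      · exact hall d (List.mem_cons_of_mem _ hd) hm'
      · exact hcr hd

lemma pvLen_ofList_eq_iff {α : Type} [BEq α] [LawfulBEq α] (xs : List α) :
    ((PySem.Set.ofList xs).length = xs.length) ↔ xs.Nodup := by
  induction xs using List.reverseRecOn with
  | nil => simp [PySem.Set.ofList_nil]
  | append_singleton xs x ih =>
    rw [PySem.Set.ofList_append_singleton, List.nodup_append]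
    have hle := PySem.Set.length_ofList_le (xs := xs)
    unfold PySem.Set.add
    by_cases hm : x ∈ xs
    · rw [pvContains_true _ _ ((PySem.Set.mem_ofList _ _).2 hm), if_pos rfl]
      simp only [List.length_append, List.length_singleton]
      constructor
      · intro h; omega
      · rintro ⟨-, -, hdisj⟩
        exact (hdisj x hm x (by simp) rfl).elim
    · rw [pvContains_false _ _ (fun h => hm ((PySem.Set.mem_ofList _ _).1 h))]
      simp only [Bool.false_eq_true, if_false, List.length_append, List.length_singleton]
      constructor
      · intro h
        refine ⟨ih.1 (by omega), List.nodup_singleton x, ?_⟩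
        intro a ha b hb
        rw [List.mem_singleton] at hb
        subst hb
        exact fun he => hm (he ▸ ha)
      · rintro ⟨h1, -, -⟩
        have := ih.2 h1
        omega

lemma pvBt_eq_filter (names : List String) : ∀ (k : Nat) (used : PySem.Set (Int × String)),
    pvBt (names.map (fun f => (f, pyGetFeatureCategory f))) (k : Int) used
      = (pyCombinations k names).filter
          (fun combo => pvOk used (combo.map pyGetFeatureCategory)) := by
  induction names with
  | nil =>
    intro k used
    cases k with
    | zero => simp [pvBt, pyCombinations, pvOk]
    | succ m =>
      rw [pvBt.eq_def]
      have : ((m : Int) + 1) ≠ 0 := by omega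
      simp [pyCombinations, this]
  | cons f ns ih =>
    intro k used
    cases k with
    | zero => simp [pvBt, pyCombinations, pvOk]
    | succ m =>
      rw [pvBt.eq_def]
      have hne : (((m + 1 : Nat) : Int)) ≠ 0 := by push_cast; omega
      simp only [hne, if_false, List.map_cons]
      have hm1 : ((m + 1 : Nat) : Int) - 1 = (m : Int) := by push_cast; ring
      rw [hm1, ih m (PySem.Set.add used (pyGetFeatureCategory f)), ih (m + 1) used]
      show _ = List.filter _ (List.map _ _ ++ _)
      rw [List.filter_append, List.filter_map]
      by_cases hc : PySem.Set.contains used (pyGetFeatureCategory f) = true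
      · simp only [hc, if_true]
        have hnil : List.filter ((fun combo => pvOk used (combo.map pyGetFeatureCategory))
              ∘ (f :: ·)) (pyCombinations m ns) = [] := by
          rw [List.filter_eq_nil_iff]
          intro t ht
          have hmem : pyGetFeatureCategory f ∈ used := (PySem.Set.contains_iff _ _).1 hc
          simp [pvOk, hmem]
        rw [hnil]
        simp
      · have hc' : PySem.Set.contains used (pyGetFeatureCategory f) = false := by
          simpa using hc
        simp only [hc', Bool.false_eq_true, if_false]
        congr 1
        congr 1
        apply List.filter_congr
        intro t ht
        have hnot : pyGetFeatureCategory f ∉ used := fun h => by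
          rw [(PySem.Set.contains_iff _ _).2 h] at hc'
          exact Bool.noConfusion hc'
        simp [pvOk, hnot, Function.comp]

-- A's foldl loop is a filter
lemma pvA_eq_filter (names : List String) (k : Nat) :
    generate_valid_combinations names (k : Int)
      = (pyCombinations k names).filter
          (fun combo => (combo.map pyGetFeatureCategory).length
              == (PySem.Set.ofList (combo.map pyGetFeatureCategory)).length) := by
  unfold generate_valid_combinations
  rw [Int.toNat_natCast]
  rw [PySem.List.foldl_append_if_eq_filter]
  simp

-- ===== VERDICT (by name: the statement is the Claim_ definition above) =====
theorem generate_valid_combinations_spec : Claim_equal_generate_valid_combinations := by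
  intro names k _ hpre
  unfold Spec_generate_valid_combinations
  obtain ⟨n, rfl⟩ : ∃ n : Nat, k = (n : Int) := ⟨k.toNat, (Int.toNat_of_nonneg hpre).symm⟩
  rw [pvA_eq_filter]
  unfold generate_valid_combinations_alt
  rw [pvBt_eq_filter]
  apply List.filter_congr
  intro combo _
  have h1 : ((combo.map pyGetFeatureCategory).length
        == (PySem.Set.ofList (combo.map pyGetFeatureCategory)).length) = true
      ↔ (combo.map pyGetFeatureCategory).Nodup := by
    rw [beq_iff_eq, eq_comm]
    exact pvLen_ofList_eq_iff _
  have h2 : pvOk PySem.Set.empty (combo.map pyGetFeatureCategory) = true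
      ↔ (combo.map pyGetFeatureCategory).Nodup := by
    rw [pvOk_iff]
    simp [PySem.Set.empty]
  rw [Bool.eq_iff_iff, h1, h2]
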